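-- pv_equiv track=rewrite | github.com/johnnylugm-tech/methodology-v2 | cli.py | _generate_deliverable_structure
-- ===== SOURCE A (Python) =====
-- def _generate_deliverable_structure(frs: list, modules: list) -> str:
--     """從 FR/Module 對應產出產出結構樹"""
--     if not modules:
--         return "*（請從 SAD.md §1.3 解析）*"
--
--     # Group by directory (normalize paths)
--     dirs = {}
--     for m in modules:
--         file_path = m.get('file', '')
--         if '/' in file_path:
--             # Normalize: strip 03-development/src/ prefix for grouping
--             if file_path.startswith('03-development/src/'):
--                 rel_path = file_path.replace('03-development/src/', '')
--             else:
--                 rel_path = file_path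
--             dir_name = '/'.join(rel_path.split('/')[:-1])
--             filename = rel_path.split('/')[-1]
--             if dir_name not in dirs:
--                 dirs[dir_name] = []
--             dirs[dir_name].append(filename)
--
--     lines = ["03-development/src/"]
--     for dir_name, files in sorted(dirs.items()):
--         lines.append(f"├── {dir_name}/")
--         for f in sorted(files):
--             lines.append(f"│   ├── {f}")
--
--     lines.append("tests/")
--     for fr in frs[:5]:
--         fr_num = fr['fr'].lower().replace('-', '').replace('fr', '').zfill(2)
--         lines.append(f"├── test_fr{fr_num}_*.py")
--     if len(frs) > 5:
--         lines.append(f"... ({len(frs) - 5} more)")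
--
--     return '\n'.join(lines)
-- ===== SOURCE B (Python) =====
-- def _rel_parts(file_path):
--     """Normalized (directory, filename) of a slash-containing module path."""
--     if file_path.startswith('03-development/src/'):
--         rel_path = file_path.replace('03-development/src/', '')
--     else:
--         rel_path = file_path
--     parts = rel_path.split('/')
--     return '/'.join(parts[:-1]), parts[-1]
--
--
-- def _generate_deliverable_structure(frs: list, modules: list) -> str:
--     """從 FR/Module 對應產出產出結構樹"""
--     if not modules:
--         return "*（請從 SAD.md §1.3 解析）*"
--
--     pairs = [_rel_parts(m.get('file', '')) for m in modules if '/' in m.get('file', '')]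
--
--     tree = []
--     for d in sorted({d for d, _ in pairs}):
--         tree.append(f"├── {d}/")
--         tree.extend(f"│   ├── {f}" for f in sorted(f for dd, f in pairs if dd == d))
--
--     tests = [f"├── test_fr{fr['fr'].lower().replace('-', '').replace('fr', '').zfill(2)}_*.py"
--              for fr in frs[:5]]
--     extra = [f"... ({len(frs) - 5} more)"] if len(frs) > 5 else []
--
--     return '\n'.join(["03-development/src/"] + tree + ["tests/"] + tests + extra)
-- ===== Notes on version B (the rewrite author's own statement) =====
-- stated objective: simpler
-- what changed: Replaces A's incrementally built dict of directory->filename lists (membership test, insert-empty, append) by one flat list of (dir, file) pairs, a sorted set of the distinct directories and a per-directory filter+sort when emitting the tree.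
import Mathlib
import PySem

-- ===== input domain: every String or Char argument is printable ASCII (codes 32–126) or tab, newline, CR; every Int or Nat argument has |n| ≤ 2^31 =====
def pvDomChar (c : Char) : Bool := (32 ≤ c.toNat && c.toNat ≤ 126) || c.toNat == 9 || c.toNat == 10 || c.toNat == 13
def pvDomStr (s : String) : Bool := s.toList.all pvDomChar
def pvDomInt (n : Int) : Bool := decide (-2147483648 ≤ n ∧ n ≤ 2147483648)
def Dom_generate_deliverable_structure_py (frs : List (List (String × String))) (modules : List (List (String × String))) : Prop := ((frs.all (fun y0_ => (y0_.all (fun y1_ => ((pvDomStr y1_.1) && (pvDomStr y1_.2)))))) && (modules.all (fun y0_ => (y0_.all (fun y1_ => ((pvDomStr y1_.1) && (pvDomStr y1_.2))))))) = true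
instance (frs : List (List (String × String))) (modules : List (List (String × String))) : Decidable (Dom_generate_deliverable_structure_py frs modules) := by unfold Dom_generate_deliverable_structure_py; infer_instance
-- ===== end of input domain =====

-- B replaces A's incrementally-built dict of directory→filenames by one flat (dir, file) pair list,
-- a sorted set of the distinct directories and a per-directory filter; objective: simpler (not faster).

-- ===== PORT A =====
-- Transliteration of A. dict keys are distinct, so Python's sorted(dirs.items()) (tuple
-- comparison, which never reaches the second component) is ported as sorting by the key.
def generate_deliverable_structure_py (frs : List (List (String × String))) (modules : List (List (String × String))) : String :=
  if modules = [] then "*（請從 SAD.md §1.3 解析）*"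
  else
    let dirs : PySem.Dict String (List String) :=
      modules.foldl (fun dirs m =>
        let file_path := (List.lookup "file" m).getD ""
        if PySem.Str.isIn "/" file_path then
          let rel_path := if PySem.Str.startswith file_path "03-development/src/"
                          then PySem.Str.replace file_path "03-development/src/" ""
                          else file_path
          let parts := (PySem.Str.split? rel_path "/").getD []
          let dir_name := PySem.Str.join "/" (PySem.List.slice parts none (some (-1)))
          let filename := PySem.List.pyGetD parts (-1) ""   -- parts is never empty: split returns ≥ 1 piece
          let dirs := if dirs.contains dir_name then dirs else dirs.insert dir_name []
          dirs.modify dir_name [] (fun fs => fs ++ [filename])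
        else dirs) PySem.Dict.empty
    let lines : List String := ["03-development/src/"]
    let lines := (PySem.List.sorted dirs.items (fun p => p.1) false).foldl
      (fun lines df =>
        (PySem.List.sorted df.2 (fun f => f) false).foldl
          (fun lines f => lines ++ ["│   ├── " ++ f])
          (lines ++ ["├── " ++ df.1 ++ "/"])) lines
    let lines := lines ++ ["tests/"]
    let lines := (PySem.List.slice frs none (some 5)).foldl
      (fun lines fr =>
        -- fr['fr'] raises KeyError when the key is absent: excluded by Pre_
        let fr_num := PySem.Str.zfill (PySem.Str.replace (PySem.Str.replace
                        (PySem.Str.lower ((List.lookup "fr" fr).getD "")) "-" "") "fr" "") 2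
        lines ++ ["├── test_fr" ++ fr_num ++ "_*.py"]) lines
    let lines := if 5 < PySem.List.len frs
                 then lines ++ ["... (" ++ PySem.Int.toStr (PySem.List.len frs - 5) ++ " more)"]
                 else lines
    PySem.Str.join "\n" lines

-- ===== PORT B =====
def pvRelParts (file_path : String) : String × String :=
  let rel_path := if PySem.Str.startswith file_path "03-development/src/"
                  then PySem.Str.replace file_path "03-development/src/" ""
                  else file_path
  let parts := (PySem.Str.split? rel_path "/").getD []
  (PySem.Str.join "/" (PySem.List.slice parts none (some (-1))), PySem.List.pyGetD parts (-1) "")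

def generate_deliverable_structure_py_alt (frs : List (List (String × String))) (modules : List (List (String × String))) : String :=
  if modules = [] then "*（請從 SAD.md §1.3 解析）*"
  else
    let pairs : List (String × String) :=
      (modules.filter (fun m => PySem.Str.isIn "/" ((List.lookup "file" m).getD ""))).map
        (fun m => pvRelParts ((List.lookup "file" m).getD ""))
    let tree : List String :=
      (PySem.List.sorted (PySem.Set.ofList (pairs.map (fun p => p.1))) (fun d => d) false).flatMap
        (fun d => ("├── " ++ d ++ "/") ::
          (PySem.List.sorted ((pairs.filter (fun p => p.1 == d)).map (fun p => p.2)) (fun f => f) false).map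
            (fun f => "│   ├── " ++ f))
    let tests : List String := (frs.take 5).map (fun fr =>
        "├── test_fr" ++ PySem.Str.zfill (PySem.Str.replace (PySem.Str.replace
          (PySem.Str.lower ((List.lookup "fr" fr).getD "")) "-" "") "fr" "") 2 ++ "_*.py")
    let extra : List String := if 5 < frs.length
                               then ["... (" ++ PySem.Int.toStr ((frs.length : Int) - 5) ++ " more)"]
                               else []
    PySem.Str.join "\n" (["03-development/src/"] ++ tree ++ ["tests/"] ++ tests ++ extra)

-- ===== PRECONDITION & SPEC =====
-- Pre_ excludes exactly the inputs where A raises KeyError: modules non-empty and some of the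
-- first five frs dicts lacking the key 'fr'.
def Pre_generate_deliverable_structure_py (frs : List (List (String × String))) (modules : List (List (String × String))) : Prop :=
  modules = [] ∨ ∀ fr ∈ frs.take 5, (List.lookup "fr" fr).isSome = true
instance (frs : List (List (String × String))) (modules : List (List (String × String))) : Decidable (Pre_generate_deliverable_structure_py frs modules) := by unfold Pre_generate_deliverable_structure_py; infer_instance

def pvWitness_generate_deliverable_structure_py : (List (List (String × String))) × (List (List (String × String))) :=
  ([[("fr", "FR-1")]], [[("file", "03-development/src/core/a.py")], [("file", "core/b.py")]])

def Spec_generate_deliverable_structure_py (frs : List (List (String × String))) (modules : List (List (String × String))) (out : String) : Prop := out = generate_deliverable_structure_py_alt frs modules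
instance (frs : List (List (String × String))) (modules : List (List (String × String))) (out : String) : Decidable (Spec_generate_deliverable_structure_py frs modules out) := by unfold Spec_generate_deliverable_structure_py; infer_instance

-- ===== CLAIM (what is proved, stated in full; the proofs are below) =====
def Claim_equal_generate_deliverable_structure_py : Prop := ∀ (frs : List (List (String × String))) (modules : List (List (String × String))), Dom_generate_deliverable_structure_py frs modules → Pre_generate_deliverable_structure_py frs modules → Spec_generate_deliverable_structure_py frs modules (generate_deliverable_structure_py frs modules)

-- ===== LEMMAS AND PROOFS =====

-- Ensuring the key and then modifying it is the same dict as modifying with the default.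
lemma pv_ensure_modify (d : PySem.Dict String (List String)) (k : String) (g : List String → List String) :
    (if d.contains k then d else d.insert k []).modify k [] g = d.modify k [] g := by
  by_cases h : d.contains k
  · simp [h]
  · rw [if_neg h]
    simp only [PySem.Dict.modify]
    rw [PySem.Dict.getD_insert_self, PySem.Dict.insert_insert_self]
    rw [PySem.Dict.getD_of_not_contains]
    exact eq_false_of_ne_true h

lemma pv_update_nil_eq_ofList {α : Type} [BEq α] (l : List α) :
    PySem.Set.update ([] : PySem.Set α) l = PySem.Set.ofList l := rfl

theorem generate_deliverable_structure_py_spec_aux (frs modules : List (List (String × String))) :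
    generate_deliverable_structure_py frs modules = generate_deliverable_structure_py_alt frs modules := by
  by_cases hm : modules = []
  · simp [generate_deliverable_structure_py, generate_deliverable_structure_py_alt, hm]
  · unfold generate_deliverable_structure_py generate_deliverable_structure_py_alt
    simp only [hm, if_false]
    -- the shared (dir, file) extraction
    set cond : List (String × String) → Bool :=
      fun m => PySem.Str.isIn "/" ((List.lookup "file" m).getD "") with hcond
    set P : List (String × String) :=
      (modules.filter cond).map (fun m => pvRelParts ((List.lookup "file" m).getD "")) with hP
    -- step 1: A's dict-building loop is the plain modify-fold over P
    have hdict :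
        modules.foldl (fun dirs m =>
          let file_path := (List.lookup "file" m).getD ""
          if PySem.Str.isIn "/" file_path then
            let rel_path := if PySem.Str.startswith file_path "03-development/src/"
                            then PySem.Str.replace file_path "03-development/src/" ""
                            else file_path
            let parts := (PySem.Str.split? rel_path "/").getD []
            let dir_name := PySem.Str.join "/" (PySem.List.slice parts none (some (-1)))
            let filename := PySem.List.pyGetD parts (-1) ""
            let dirs := if dirs.contains dir_name then dirs else dirs.insert dir_name []
            dirs.modify dir_name [] (fun fs => fs ++ [filename])
          else dirs) PySem.Dict.empty
        = P.foldl (fun d p => d.modify p.1 [] (fun x => x ++ [p.2])) PySem.Dict.empty := by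
      rw [hP, List.foldl_map, List.foldl_filter]
      apply PySem.List.foldl_congr_mem
      intro acc m _
      simp only [hcond]
      by_cases h : PySem.Str.isIn "/" ((List.lookup "file" m).getD "") = true
      · rw [if_pos h, if_pos h]
        simp only [pvRelParts, pv_ensure_modify]
      · rw [if_neg h, if_neg h]
    rw [hdict]
    set dirs : PySem.Dict String (List String) :=
      P.foldl (fun d p => d.modify p.1 [] (fun x => x ++ [p.2])) PySem.Dict.empty with hdirs
    -- step 2: the contents of the dict, expressed over P
    have hkeys : dirs.keys = PySem.Set.ofList (P.map (fun p => p.1)) := by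
      rw [hdirs, PySem.Dict.keys_foldl_modify_key, PySem.Dict.keys_empty, pv_update_nil_eq_ofList]
    have hnodup : dirs.keys.Nodup := by
      rw [hdirs]
      exact PySem.Dict.nodup_keys_foldl_modify_key _ _ _ _ _ (by simp [PySem.Dict.keys_empty])
    have hgetD : ∀ c, dirs.getD c [] = (P.filter (fun p => p.1 == c)).map (fun p => p.2) := by
      intro c
      rw [hdirs, PySem.Dict.getD_foldl_modify_append, PySem.Dict.getD_empty]
      simp
    -- step 3: the sorted items list, expressed over the sorted distinct dirs
    set D : List String := PySem.List.sorted (PySem.Set.ofList (P.map (fun p => p.1))) (fun d => d) false with hD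
    have hsorted : PySem.List.sorted dirs.items (fun p => p.1) false
        = D.map (fun k => (k, dirs.getD k [])) := by
      apply PySem.List.sorted_eq_of_perm_of_pairwise_lt
      · rw [PySem.Dict.items_eq_map_keys dirs hnodup ([] : List String), hkeys]
        exact (PySem.List.sorted_perm _ _ _).map _
      · rw [List.pairwise_map]
        exact PySem.List.sorted_ofList_pairwise_lt _
    rw [hsorted]
    -- step 4: A's nested append-folds over the sorted items are B's flatMap over D
    have hstep : (fun (lines : List String) (df : String × List String) =>
          (PySem.List.sorted df.2 (fun f => f) false).foldl
            (fun lines f => lines ++ ["│   ├── " ++ f])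
            (lines ++ ["├── " ++ df.1 ++ "/"]))
        = fun lines df => lines ++ (("├── " ++ df.1 ++ "/") ::
            (PySem.List.sorted df.2 (fun f => f) false).map (fun f => "│   ├── " ++ f)) := by
      funext lines df
      rw [PySem.List.foldl_append_singleton_eq_map]
      simp
    -- step 5: the tests suffix
    have htake : PySem.List.slice frs none (some 5) = frs.take 5 := by
      rw [PySem.List.slice_to frs (by norm_num)]
      rfl
    -- step 6: the "... more" line and assembly
    have hlt : (5 < PySem.List.len frs) ↔ 5 < frs.length := by
      rw [PySem.List.len_eq]; exact_mod_cast Iff.rfl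
    by_cases h5 : 5 < frs.length
    · rw [if_pos (hlt.mpr h5), if_pos h5, hstep,
        PySem.List.foldl_append_singleton_eq_map, PySem.List.foldl_append_eq_flatMap,
        List.flatMap_map, htake, PySem.List.len_eq]
      all_goals simp [hgetD, List.append_assoc]
    · rw [if_neg (fun h => h5 (hlt.mp h)), if_neg h5, hstep,
        PySem.List.foldl_append_singleton_eq_map, PySem.List.foldl_append_eq_flatMap,
        List.flatMap_map, htake]
      all_goals simp [hgetD, List.append_assoc]

-- ===== VERDICT (by name: the statement is the Claim_ definition above) =====
theorem generate_deliverable_structure_py_spec : Claim_equal_generate_deliverable_structure_py := by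
  intro frs modules _ _
  exact generate_deliverable_structure_py_spec_aux frs modules
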